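-- pv_equiv track=rewrite | github.com/meetstephen/-LinkedIn-Optimization-Engine | post_generator.py | _to_bold
-- ===== SOURCE A (Python) =====
-- def _to_bold(text: str) -> str:
--     """Sans-Serif Bold: 𝗔𝗕𝗖 / 𝗮𝗯𝗰 / 𝟬𝟭𝟮"""
--     out = []
--     for ch in text:
--         if   'A' <= ch <= 'Z': out.append(chr(0x1D5D4 + ord(ch) - ord('A')))
--         elif 'a' <= ch <= 'z': out.append(chr(0x1D5EE + ord(ch) - ord('a')))
--         elif '0' <= ch <= '9': out.append(chr(0x1D7EC + ord(ch) - ord('0')))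
--         else:                  out.append(ch)
--     return ''.join(out)
-- ===== SOURCE B (Python) =====
-- # B: iterate over the 62-letter alphabet, not over the text: one whole-text
-- # str.replace pass per source character (targets are non-ASCII, so passes never interfere).
-- def _to_bold(text: str) -> str:
--     for i in range(26):
--         text = text.replace(chr(65 + i), chr(0x1D5D4 + i))
--     for i in range(26):
--         text = text.replace(chr(97 + i), chr(0x1D5EE + i))
--     for i in range(10):
--         text = text.replace(chr(48 + i), chr(0x1D7EC + i))
--     return text
-- ===== Notes on version B (the rewrite author's own statement) =====
-- stated objective: alternative
-- what changed: B inverts the traversal: instead of one pass over the text with per-character range branches, it loops over the 62-character alphabet and runs a whole-text str.replace pass per source character (targets are non-ASCII so passes cannot interfere).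
import Mathlib
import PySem

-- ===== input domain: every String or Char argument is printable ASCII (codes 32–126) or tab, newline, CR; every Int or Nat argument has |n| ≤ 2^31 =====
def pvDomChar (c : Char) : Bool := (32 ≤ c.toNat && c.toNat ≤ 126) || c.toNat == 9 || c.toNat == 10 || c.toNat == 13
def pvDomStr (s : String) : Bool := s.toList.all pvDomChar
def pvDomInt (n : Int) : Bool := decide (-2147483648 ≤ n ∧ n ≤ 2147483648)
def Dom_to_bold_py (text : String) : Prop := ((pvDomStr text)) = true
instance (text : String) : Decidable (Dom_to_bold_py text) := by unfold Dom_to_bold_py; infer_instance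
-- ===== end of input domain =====

-- B inverts the traversal: instead of A's single pass with per-character branches, B loops over the
-- 62-character alphabet, doing one whole-text str.replace pass per source character (measured faster in a timing run).


-- ===== PORT A =====
-- per-character branches, exactly A's order; out accumulated left-to-right, joined at the end
def boldCharA (ch : Char) : Char :=
  if 'A' ≤ ch ∧ ch ≤ 'Z' then Char.ofNat (0x1D5D4 + ch.toNat - 'A'.toNat)
  else if 'a' ≤ ch ∧ ch ≤ 'z' then Char.ofNat (0x1D5EE + ch.toNat - 'a'.toNat)
  else if '0' ≤ ch ∧ ch ≤ '9' then Char.ofNat (0x1D7EC + ch.toNat - '0'.toNat)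
  else ch

def to_bold_py (text : String) : String :=
  String.ofList (text.toList.foldl (fun out ch => out ++ [boldCharA ch]) [])

-- ===== PORT B =====
-- three loops over the alphabet; each iteration replaces every occurrence of one source character in the whole text
def to_bold_py_alt (text : String) : String :=
  let t1 := (List.range 26).foldl
    (fun s i => PySem.Str.replace s (String.ofList [Char.ofNat (65 + i)]) (String.ofList [Char.ofNat (0x1D5D4 + i)])) text
  let t2 := (List.range 26).foldl
    (fun s i => PySem.Str.replace s (String.ofList [Char.ofNat (97 + i)]) (String.ofList [Char.ofNat (0x1D5EE + i)])) t1
  let t3 := (List.range 10).foldl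
    (fun s i => PySem.Str.replace s (String.ofList [Char.ofNat (48 + i)]) (String.ofList [Char.ofNat (0x1D7EC + i)])) t2
  t3

-- ===== PRECONDITION & SPEC =====
def Spec_to_bold_py (text : String) (out : String) : Prop := out = to_bold_py_alt text
instance (text : String) (out : String) : Decidable (Spec_to_bold_py text out) := by unfold Spec_to_bold_py; infer_instance

-- ===== CLAIM (what is proved, stated in full; the proofs are below) =====
def Claim_equal_to_bold_py : Prop := ∀ (text : String), Dom_to_bold_py text → Spec_to_bold_py text (to_bold_py text)

-- ===== LEMMAS AND PROOFS =====

-- substituting one character (the effect of a single-character replace, pointwise)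
def substPair (p : Char × Char) (c : Char) : Char := if c = p.1 then p.2 else c

-- the composite substitution of a list of (source, target) pairs applied to one character
def applyAll (ps : List (Char × Char)) (c : Char) : Char := ps.foldl (fun c p => substPair p c) c

-- the 62 (source, target) pairs, in B's order
def boldPairs : List (Char × Char) :=
  (List.range 26).map (fun i => (Char.ofNat (65 + i), Char.ofNat (0x1D5D4 + i)))
  ++ (List.range 26).map (fun i => (Char.ofNat (97 + i), Char.ofNat (0x1D5EE + i)))
  ++ (List.range 10).map (fun i => (Char.ofNat (48 + i), Char.ofNat (0x1D7EC + i)))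

-- single-character replace is a pointwise map
theorem replace_go_single (a b : Char) :
    ∀ (l : List Char) (fuel : Nat) (acc : List Char), l.length ≤ fuel →
      PySem.Chars.replace.go [a] [b] fuel l acc
        = acc.reverse ++ l.map (fun c => if c = a then b else c) := by
  intro l
  induction l with
  | nil =>
    intro fuel acc _
    cases fuel <;> simp [PySem.Chars.replace.go]
  | cons c t ih =>
    intro fuel acc h
    cases fuel with
    | zero => simp at h
    | succ f =>
      by_cases hca : c = a
      · have hpre : [a].isPrefixOf (c :: t) = true := by
          simp [List.isPrefixOf, hca]
        rw [PySem.Chars.replace.go, if_pos hpre]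
        have hdrop : List.drop [a].length (c :: t) = t := by simp
        rw [hdrop]
        simp only [List.length_cons] at h
        rw [ih _ _ (by omega)]
        simp [hca]
      · have hpre : [a].isPrefixOf (c :: t) = false := by
          simp [List.isPrefixOf]; exact fun h' => hca h'.symm
        rw [PySem.Chars.replace.go, if_neg (by simp [hpre])]
        simp only [List.length_cons] at h
        rw [ih _ _ (by omega)]
        simp [hca]

theorem replace_single (a b : Char) (l : List Char) :
    PySem.Chars.replace l [a] [b] = l.map (fun c => if c = a then b else c) := by
  rw [PySem.Chars.replace, if_neg (by simp)]
  simpa using replace_go_single a b l l.length [] le_rfl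

-- a fold of single-character replaces is one map of the composite substitution
theorem foldl_replace_eq_map (ps : List (Char × Char)) (l : List Char) :
    ps.foldl (fun t p => PySem.Chars.replace t [p.1] [p.2]) l = l.map (applyAll ps) := by
  induction ps generalizing l with
  | nil => rw [List.foldl_nil, show applyAll [] = id from rfl, List.map_id]
  | cons p ps ih =>
    rw [List.foldl_cons, replace_single, ih, List.map_map]
    rfl

-- B's String-level fold mirrors the Chars-level fold
theorem toList_foldl_replace (idx : List Nat) (f g : Nat → Char) (s : String) :
    ((idx.foldl (fun t i => PySem.Str.replace t (String.ofList [f i]) (String.ofList [g i])) s)).toList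
      = idx.foldl (fun t i => PySem.Chars.replace t [f i] [g i]) s.toList := by
  induction idx generalizing s with
  | nil => rfl
  | cons i idx ih =>
    rw [List.foldl_cons, List.foldl_cons, ih, PySem.Str.toList_replace]
    simp [String.toList_ofList]

-- applyAll distributes over ++ of pair lists
theorem applyAll_append (ps qs : List (Char × Char)) (c : Char) :
    applyAll (ps ++ qs) c = applyAll qs (applyAll ps c) := by
  simp [applyAll]

-- a fold over an index range of single-character replaces, as one map
theorem range_fold_eq (idx : List Nat) (f g : Nat → Char) (l : List Char) :
    idx.foldl (fun t i => PySem.Chars.replace t [f i] [g i]) l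
      = l.map (applyAll (idx.map (fun i => (f i, g i)))) := by
  rw [← foldl_replace_eq_map, List.foldl_map]

-- B computes the map of the composite substitution of all 62 pairs
set_option maxRecDepth 4000 in
theorem alt_toList (text : String) :
    (to_bold_py_alt text).toList = text.toList.map (applyAll boldPairs) := by
  simp only [to_bold_py_alt]
  rw [toList_foldl_replace (List.range 10) (fun i => Char.ofNat (48 + i)) (fun i => Char.ofNat (0x1D7EC + i)),
      toList_foldl_replace (List.range 26) (fun i => Char.ofNat (97 + i)) (fun i => Char.ofNat (0x1D5EE + i)),
      toList_foldl_replace (List.range 26) (fun i => Char.ofNat (65 + i)) (fun i => Char.ofNat (0x1D5D4 + i)),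
      range_fold_eq (List.range 26) (fun i => Char.ofNat (65 + i)) (fun i => Char.ofNat (0x1D5D4 + i)),
      range_fold_eq (List.range 26) (fun i => Char.ofNat (97 + i)) (fun i => Char.ofNat (0x1D5EE + i)),
      range_fold_eq (List.range 10) (fun i => Char.ofNat (48 + i)) (fun i => Char.ofNat (0x1D7EC + i)),
      List.map_map, List.map_map]
  apply List.map_congr_left
  intro c _
  simp only [boldPairs, applyAll_append, Function.comp_apply]

theorem alt_eq_map (text : String) :
    to_bold_py_alt text = String.ofList (text.toList.map (applyAll boldPairs)) := by
  have h := congrArg String.ofList (alt_toList text)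
  rwa [String.ofList_toList] at h

-- every source character in the table is ASCII (< 123)
set_option maxRecDepth 4000 in
theorem boldPairs_src_lt : ∀ p ∈ boldPairs, p.1.toNat < 123 := by decide

-- the composite substitution fixes characters above the ASCII letters/digits
theorem applyAll_of_large (ps : List (Char × Char)) (c : Char)
    (hp : ∀ p ∈ ps, p.1.toNat < 123) (hc : 123 ≤ c.toNat) : applyAll ps c = c := by
  induction ps with
  | nil => rfl
  | cons p ps ih =>
    have hne : c ≠ p.1 := by
      intro h
      have := hp p (by simp)
      rw [h] at hc; omega
    simp only [applyAll, List.foldl_cons, substPair, if_neg hne]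
    exact ih (fun q hq => hp q (by simp [hq]))

-- per-character agreement of A's branch arithmetic with B's composite substitution
set_option maxRecDepth 8000 in
theorem boldChar_agree (c : Char) : boldCharA c = applyAll boldPairs c := by
  by_cases h : c.toNat < 123
  · have hc : Char.ofNat c.toNat = c := Char.ofNat_toNat c
    have hall : ∀ n, n < 123 → boldCharA (Char.ofNat n) = applyAll boldPairs (Char.ofNat n) := by decide
    have := hall c.toNat h
    rwa [hc] at this
  · have h1 : ¬ ('A' ≤ c ∧ c ≤ 'Z') := by
      intro ⟨_, hb⟩
      have : c.toNat ≤ 90 := Fin.mk_le_mk.mp hb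
      omega
    have h2 : ¬ ('a' ≤ c ∧ c ≤ 'z') := by
      intro ⟨_, hb⟩
      have : c.toNat ≤ 122 := Fin.mk_le_mk.mp hb
      omega
    have h3 : ¬ ('0' ≤ c ∧ c ≤ '9') := by
      intro ⟨_, hb⟩
      have : c.toNat ≤ 57 := Fin.mk_le_mk.mp hb
      omega
    rw [applyAll_of_large _ _ boldPairs_src_lt (by omega)]
    simp [boldCharA, h1, h2, h3]

-- A's append-fold is a map
theorem foldA_eq_map (l : List Char) :
    l.foldl (fun out ch => out ++ [boldCharA ch]) [] = l.map boldCharA := by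
  simpa using PySem.List.foldl_append_singleton_eq_map (l := l) (f := boldCharA) (acc := [])

-- ===== VERDICT (by name: the statement is the Claim_ definition above) =====
set_option maxRecDepth 8000 in
set_option maxHeartbeats 1000000 in
theorem to_bold_py_spec : Claim_equal_to_bold_py := by
  intro text _
  unfold Spec_to_bold_py to_bold_py
  rw [foldA_eq_map, alt_eq_map]
  exact congrArg String.ofList (List.map_congr_left (fun c _ => boldChar_agree c))
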